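-- pv_equiv track=rewrite | github.com/RealCAnders/2020_CA-Thesis | models_DEAP/pipeline_DEAP.py | identify_triggers
-- ===== SOURCE A (Python) =====
-- def identify_triggers(trigger_signal, estimated_trigger_distance, indicator_value):
--
--     # 1st version: define the timestamp when the signal is at zero again as "start of trigger"
--     triggers = [0]
--     ttl_found = False
--     ttl_samples_ctr = 0
--
--     for idx, data_point in enumerate(trigger_signal):
--         if triggers[-1] + int(0.9 * estimated_trigger_distance) <= idx and trigger_signal[idx] == indicator_value:
--             ttl_found = True
--             ttl_samples_ctr = ttl_samples_ctr + 1
--         else: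
--             ttl_found = False
--         if ttl_samples_ctr > 0 and not ttl_found:
--             triggers.append(idx)
--             ttl_samples_ctr = 0
--
--     return triggers[1:]
-- ===== SOURCE B (Python) =====
-- def identify_triggers(trigger_signal, estimated_trigger_distance, indicator_value):
--     # Alternative decomposition: explicit two-pointer scan (seek a run start, then skip the run).
--     thr = int(0.9 * estimated_trigger_distance)
--     n = len(trigger_signal)
--     triggers = []
--     last = 0
--     i = 0
--     while i < n:
--         if last + thr <= i and trigger_signal[i] == indicator_value:
--             j = i + 1
--             while j < n and trigger_signal[j] == indicator_value:
--                 j += 1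
--             if j < n:
--                 triggers.append(j)
--                 last = j
--             i = j + 1
--         else:
--             i += 1
--     return triggers
-- ===== Notes on version B (the rewrite author's own statement) =====
-- stated objective: alternative
-- what changed: Replaces A's single enumerate pass threading (triggers, ttl_found, counter) state through every sample with an explicit two-pointer scan: an outer while seeks a guarded run start, an inner while skips the consecutive indicator run, and the run's end index is recorded directly.
import Mathlib
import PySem

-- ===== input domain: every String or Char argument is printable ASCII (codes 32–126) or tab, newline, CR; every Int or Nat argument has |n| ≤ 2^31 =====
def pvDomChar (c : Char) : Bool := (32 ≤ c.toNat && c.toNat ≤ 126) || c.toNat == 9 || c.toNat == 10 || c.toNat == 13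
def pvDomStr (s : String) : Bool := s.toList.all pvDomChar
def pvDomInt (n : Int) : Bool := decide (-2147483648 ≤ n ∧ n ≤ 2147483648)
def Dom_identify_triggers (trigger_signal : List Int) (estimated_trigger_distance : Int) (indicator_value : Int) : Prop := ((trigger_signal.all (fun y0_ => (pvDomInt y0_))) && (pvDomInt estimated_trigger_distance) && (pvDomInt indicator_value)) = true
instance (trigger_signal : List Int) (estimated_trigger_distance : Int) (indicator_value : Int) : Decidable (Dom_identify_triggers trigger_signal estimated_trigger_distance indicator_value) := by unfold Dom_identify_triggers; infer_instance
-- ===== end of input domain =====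

-- B rewrites A's single accumulator-state pass as an explicit two-pointer scan (seek a run
-- start, skip the run, record its end); objective: alternative decomposition, same O(n) cost.

-- Shared helper: exact integer emulation of CPython's `int(0.9 * x)` for an int x
-- (0.9 is the double 8106479329266893/2^53; the product is rounded to 53 significant
-- bits with round-to-nearest-even, then truncated toward zero). Exact for |x| ≤ 2^31.
def pyInt09 (x : Int) : Int :=
  let p : Int := x * 8106479329266893
  if p = 0 then 0
  else
    let a := p.natAbs
    let nb := Nat.log2 a + 1
    if nb ≤ 53 then p.sign * ((a / 2 ^ 53 : Nat) : Int)
    else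
      let s := nb - 53
      let q := a / 2 ^ s
      let r := a % 2 ^ s
      let half := 2 ^ (s - 1)
      let m := if half < r then q + 1 else if r < half then q else if q % 2 = 0 then q else q + 1
      p.sign * (((m * 2 ^ s) / 2 ^ 53 : Nat) : Int)

-- ===== PORT A =====
-- the body of A's for-loop (state: (triggers, ttl_found, ttl_samples_ctr));
-- triggers[-1] is ported as pyGetD … (-1) 0: triggers is never empty, so Python never raises.
def aStep (trigger_signal : List Int) (thr indicator_value : Int)
    (st : List Int × Bool × Int) (p : Int × Int) : List Int × Bool × Int :=
  let triggers := st.1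
  let ctr := st.2.2
  let idx := p.1
  let fc : Bool × Int :=
    if PySem.List.pyGetD triggers (-1) 0 + thr ≤ idx ∧
        PySem.List.pyGetD trigger_signal idx 0 = indicator_value
    then (true, ctr + 1) else (false, ctr)
  if fc.2 > 0 ∧ fc.1 = false then (triggers ++ [idx], fc.1, 0) else (triggers, fc.1, fc.2)

def identify_triggers (trigger_signal : List Int) (estimated_trigger_distance : Int) (indicator_value : Int) : List Int :=
  let thr := pyInt09 estimated_trigger_distance
  let st := (PySem.List.enumerate trigger_signal 0).foldl (aStep trigger_signal thr indicator_value) ([0], false, 0)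
  PySem.List.slice st.1 (some 1) none

-- ===== PORT B =====
-- inner while loop of B: advance j past consecutive indicator samples
def bRunEnd (trigger_signal : List Int) (indicator_value : Int) (j : Nat) : Nat :=
  if h : j < trigger_signal.length then
    if PySem.List.pyGetD trigger_signal (j : Int) 0 = indicator_value then
      bRunEnd trigger_signal indicator_value (j + 1)
    else j
  else j
termination_by trigger_signal.length - j

-- needed by bLoop's termination proof
theorem le_bRunEnd (trigger_signal : List Int) (indicator_value : Int) (j : Nat) :
    j ≤ bRunEnd trigger_signal indicator_value j := by
  fun_induction bRunEnd trigger_signal indicator_value j with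
  | case1 _ _ _ ih => omega
  | case2 => omega
  | case3 => omega

-- outer while loop of B (state: triggers, last, i)
def bLoop (trigger_signal : List Int) (thr indicator_value : Int)
    (triggers : List Int) (last : Int) (i : Nat) : List Int :=
  if h : i < trigger_signal.length then
    if last + thr ≤ (i : Int) ∧ PySem.List.pyGetD trigger_signal (i : Int) 0 = indicator_value then
      let j := bRunEnd trigger_signal indicator_value (i + 1)
      if hj : j < trigger_signal.length then
        bLoop trigger_signal thr indicator_value (triggers ++ [(j : Int)]) (j : Int) (j + 1)
      else
        bLoop trigger_signal thr indicator_value triggers last (j + 1)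
    else bLoop trigger_signal thr indicator_value triggers last (i + 1)
  else triggers
termination_by trigger_signal.length - i
decreasing_by
  · have := le_bRunEnd trigger_signal indicator_value (i + 1); omega
  · have := le_bRunEnd trigger_signal indicator_value (i + 1); omega
  · omega

def identify_triggers_alt (trigger_signal : List Int) (estimated_trigger_distance : Int) (indicator_value : Int) : List Int :=
  let thr := pyInt09 estimated_trigger_distance
  bLoop trigger_signal thr indicator_value [] 0 0

-- ===== PRECONDITION & SPEC =====
def Spec_identify_triggers (trigger_signal : List Int) (estimated_trigger_distance : Int) (indicator_value : Int) (out : List Int) : Prop := out = identify_triggers_alt trigger_signal estimated_trigger_distance indicator_value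
instance (trigger_signal : List Int) (estimated_trigger_distance : Int) (indicator_value : Int) (out : List Int) : Decidable (Spec_identify_triggers trigger_signal estimated_trigger_distance indicator_value out) := by unfold Spec_identify_triggers; infer_instance

-- ===== CLAIM (what is proved, stated in full; the proofs are below) =====
def Claim_equal_identify_triggers : Prop := ∀ (trigger_signal : List Int) (estimated_trigger_distance : Int) (indicator_value : Int), Dom_identify_triggers trigger_signal estimated_trigger_distance indicator_value → Spec_identify_triggers trigger_signal estimated_trigger_distance indicator_value (identify_triggers trigger_signal estimated_trigger_distance indicator_value)

-- ===== LEMMAS AND PROOFS =====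

theorem bRunEnd_of_ge (trigger_signal : List Int) (indicator_value : Int) (j : Nat)
    (h : trigger_signal.length ≤ j) : bRunEnd trigger_signal indicator_value j = j := by
  rw [bRunEnd]; simp [Nat.not_lt.mpr h]

theorem bLoop_of_ge (trigger_signal : List Int) (thr indicator_value : Int)
    (triggers : List Int) (last : Int) (i : Nat) (h : trigger_signal.length ≤ i) :
    bLoop trigger_signal thr indicator_value triggers last i = triggers := by
  rw [bLoop]; simp [Nat.not_lt.mpr h]

theorem bLoop_found (trigger_signal : List Int) (thr indicator_value : Int)
    (triggers : List Int) (last : Int) (i : Nat) (h : i < trigger_signal.length)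
    (hcond : last + thr ≤ (i : Int) ∧ PySem.List.pyGetD trigger_signal (i : Int) 0 = indicator_value) :
    bLoop trigger_signal thr indicator_value triggers last i
      = if bRunEnd trigger_signal indicator_value (i + 1) < trigger_signal.length
        then bLoop trigger_signal thr indicator_value
              (triggers ++ [(bRunEnd trigger_signal indicator_value (i + 1) : Int)])
              ((bRunEnd trigger_signal indicator_value (i + 1) : Int))
              (bRunEnd trigger_signal indicator_value (i + 1) + 1)
        else triggers := by
  rw [bLoop, dif_pos h, if_pos hcond]
  by_cases hj : bRunEnd trigger_signal indicator_value (i + 1) < trigger_signal.length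
  · simp [hj]
  · simp only [hj, dite_eq_ite, if_false]
    have hle := le_bRunEnd trigger_signal indicator_value (i + 1)
    exact bLoop_of_ge _ _ _ _ _ _ (by omega)

theorem bLoop_notfound (trigger_signal : List Int) (thr indicator_value : Int)
    (triggers : List Int) (last : Int) (i : Nat) (h : i < trigger_signal.length)
    (hcond : ¬ (last + thr ≤ (i : Int) ∧ PySem.List.pyGetD trigger_signal (i : Int) 0 = indicator_value)) :
    bLoop trigger_signal thr indicator_value triggers last i
      = bLoop trigger_signal thr indicator_value triggers last (i + 1) := by
  rw [bLoop, dif_pos h, if_neg hcond]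

theorem bLoop_append (trigger_signal : List Int) (thr indicator_value : Int)
    (pre acc : List Int) (last : Int) (i : Nat) :
    bLoop trigger_signal thr indicator_value (pre ++ acc) last i
      = pre ++ bLoop trigger_signal thr indicator_value acc last i := by
  fun_induction bLoop trigger_signal thr indicator_value acc last i with
  | case1 acc last i h hcond j hj ih =>
      rw [bLoop]
      simp only [h, hcond, and_self, dite_eq_ite, if_true, dif_pos, List.append_assoc]
      rw [if_pos hj]
      exact ih
  | case2 acc last i h hcond j hj ih =>
      rw [bLoop]
      simp only [h, hcond, and_self, dite_eq_ite, if_true, dif_pos]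
      rw [if_neg hj]
      exact ih
  | case3 acc last i h hcond ih =>
      rw [bLoop, dif_pos h, if_neg hcond]
      exact ih
  | case4 acc last i h =>
      rw [bLoop]; simp [h]

theorem aFold_eq (trigger_signal : List Int) (thr indicator_value : Int) (xs : List Int) :
    ∀ (k : Nat) (triggers : List Int), trigger_signal.drop k = xs →
      ((∀ (f : Bool),
          ((PySem.List.enumerate xs (k : Int)).foldl (aStep trigger_signal thr indicator_value) (triggers, f, 0)).1
            = bLoop trigger_signal thr indicator_value triggers (PySem.List.pyGetD triggers (-1) 0) k)
        ∧ (∀ (f : Bool) (ctr : Int), 0 < ctr →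
            PySem.List.pyGetD triggers (-1) 0 + thr ≤ (k : Int) →
          ((PySem.List.enumerate xs (k : Int)).foldl (aStep trigger_signal thr indicator_value) (triggers, f, ctr)).1
            = if bRunEnd trigger_signal indicator_value k < trigger_signal.length
              then bLoop trigger_signal thr indicator_value
                    (triggers ++ [(bRunEnd trigger_signal indicator_value k : Int)])
                    ((bRunEnd trigger_signal indicator_value k : Int))
                    (bRunEnd trigger_signal indicator_value k + 1)
              else triggers)) := by
  induction xs with
  | nil =>
      intro k triggers hdrop
      have hk : trigger_signal.length ≤ k := by
        by_contra hlt
        have := List.drop_eq_nil_iff.mp hdrop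
        omega
      constructor
      · intro f
        simp [PySem.List.enumerate, bLoop_of_ge _ _ _ _ _ _ hk]
      · intro f ctr _ _
        simp [PySem.List.enumerate, bRunEnd_of_ge _ _ _ hk, Nat.not_lt.mpr hk]
  | cons x rest ih =>
      intro k triggers hdrop
      have hk : k < trigger_signal.length := by
        by_contra hge
        have hnil : trigger_signal.drop k = [] := List.drop_eq_nil_iff.mpr (by omega)
        rw [hnil] at hdrop
        simp at hdrop
      have hrest : trigger_signal.drop (k + 1) = rest := by
        have ht : trigger_signal.drop (k + 1) = (trigger_signal.drop k).tail := by
          rw [List.tail_drop]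
        rw [ht, hdrop]; rfl
      constructor
      · -- seek phase (ctr = 0)
        intro f
        rw [PySem.List.enumerate_cons]
        by_cases hcond : PySem.List.pyGetD triggers (-1) 0 + thr ≤ (k : Int) ∧
            PySem.List.pyGetD trigger_signal (k : Int) 0 = indicator_value
        · -- run starts at k
          have hstep : aStep trigger_signal thr indicator_value (triggers, f, 0) ((k : Int), x)
              = (triggers, true, 1) := by
            simp only [aStep]
            rw [if_pos hcond]
            simp
          rw [List.foldl_cons, hstep]
          have hrun := (ih (k + 1) triggers hrest).2 true 1 (by omega)
            (by push_cast; omega)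
          rw [show ((k : Int) + 1) = ((k + 1 : Nat) : Int) by push_cast; ring, hrun]
          exact (bLoop_found trigger_signal thr indicator_value triggers
            (PySem.List.pyGetD triggers (-1) 0) k hk hcond).symm
        · -- no run start: state unchanged
          have hstep : aStep trigger_signal thr indicator_value (triggers, f, 0) ((k : Int), x)
              = (triggers, false, 0) := by
            simp only [aStep]
            rw [if_neg hcond]
            simp
          rw [List.foldl_cons, hstep]
          have hseek := (ih (k + 1) triggers hrest).1 false
          rw [show ((k : Int) + 1) = ((k + 1 : Nat) : Int) by push_cast; ring, hseek]
          exact (bLoop_notfound trigger_signal thr indicator_value triggers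
            (PySem.List.pyGetD triggers (-1) 0) k hk hcond).symm
      · -- run phase (0 < ctr, guard holds)
        intro f ctr hctr hguard
        rw [PySem.List.enumerate_cons]
        by_cases hxi : PySem.List.pyGetD trigger_signal (k : Int) 0 = indicator_value
        · -- still inside the run
          have hstep : aStep trigger_signal thr indicator_value (triggers, f, ctr) ((k : Int), x)
              = (triggers, true, ctr + 1) := by
            have hc : PySem.List.pyGetD triggers (-1) 0 + thr ≤ (k : Int) ∧
                PySem.List.pyGetD trigger_signal (k : Int) 0 = indicator_value := ⟨hguard, hxi⟩
            simp only [aStep]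
            rw [if_pos hc]
            simp
          rw [List.foldl_cons, hstep]
          have hrun := (ih (k + 1) triggers hrest).2 true (ctr + 1) (by omega)
            (by push_cast at hguard ⊢; omega)
          rw [show ((k : Int) + 1) = ((k + 1 : Nat) : Int) by push_cast; ring, hrun]
          have hre : bRunEnd trigger_signal indicator_value k
              = bRunEnd trigger_signal indicator_value (k + 1) := by
            rw [bRunEnd]; simp [hk, hxi]
          rw [hre]
        · -- run ends at k: A appends k; B's inner loop stops at k
          have hstep : aStep trigger_signal thr indicator_value (triggers, f, ctr) ((k : Int), x)
              = (triggers ++ [(k : Int)], false, 0) := by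
            have hc : ¬ (PySem.List.pyGetD triggers (-1) 0 + thr ≤ (k : Int) ∧
                PySem.List.pyGetD trigger_signal (k : Int) 0 = indicator_value) := fun h => hxi h.2
            simp only [aStep]
            rw [if_neg hc]
            simp [hctr]
          rw [List.foldl_cons, hstep]
          have hseek := (ih (k + 1) (triggers ++ [(k : Int)]) hrest).1 false
          rw [show ((k : Int) + 1) = ((k + 1 : Nat) : Int) by push_cast; ring, hseek]
          have hxi' : trigger_signal[k] ≠ indicator_value := by
            simpa [List.getElem?_eq_getElem hk] using hxi
          have hre : bRunEnd trigger_signal indicator_value k = k := by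
            rw [bRunEnd]; simp [hk, hxi']
          rw [hre, if_pos hk, PySem.List.pyGetD_neg_one_append_singleton]

-- ===== VERDICT (by name: the statement is the Claim_ definition above) =====
theorem identify_triggers_spec : Claim_equal_identify_triggers := by
  intro trigger_signal est ind _dom
  unfold Spec_identify_triggers identify_triggers identify_triggers_alt
  have h := (aFold_eq trigger_signal (pyInt09 est) ind trigger_signal 0 [0] (by simp)).1 false
  simp only [Nat.cast_zero] at h
  rw [PySem.List.slice_from_one, h]
  have h0 : PySem.List.pyGetD ([0] : List Int) (-1) 0 = 0 := by decide
  rw [h0, show ([0] : List Int) = [0] ++ [] from rfl, bLoop_append]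
  rfl
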